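-- pv_equiv track=rewrite | github.com/CesarQuesada/proyecto-busqueda-inteligente | traductorMapa.py | generar_diccionario_vecinos
-- ===== SOURCE A (Python) =====
-- def generar_diccionario_vecinos(mapa):
--     # Convertir el mapa en una lista de listas de enteros
--     filas = mapa.strip().split('\n')
--     matriz = [[int(c) for c in fila] for fila in filas]
--
--     # Obtener las dimensiones del mapa
--     m = len(matriz[0])
--     n = len(matriz)
--
--     # Definir las posiciones de los vecinos
--     posiciones_vecinos = [(0, -1), (-1, 0), (1, 0), (0, 1)]
--
--     # Función para verificar si una casilla está dentro del mapa y no es 0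
--     def es_valida(x, y):
--         return 0 <= x < m and 0 <= y < n and matriz[y][x] != 0
--
--     # Generar el diccionario de vecinos para cada casilla no nula
--     diccionario_vecinos = {}
--     for y in range(n):
--         for x in range(m):
--             valor = matriz[y][x]
--             if valor != 0:
--                 vecinos = {}
--                 for dx, dy in posiciones_vecinos:
--                     nx, ny = x + dx, y + dy
--                     if es_valida(nx, ny):
--                         vecinos[f'{chr(ord("a") + n - 1 - ny )}{nx + 1}'] = matriz[ny][nx]
--                 diccionario_vecinos[f'{chr(ord("a") + n - 1 - y )}{x + 1}'] = vecinos
--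
--     return diccionario_vecinos
-- ===== SOURCE B (Python) =====
-- def generar_diccionario_vecinos(mapa):
--     # Sliding-window re-implementation: walk each row zipped with the rows
--     # above and below (zero padding) and with itself shifted left/right, so
--     # no index bounds checks or coordinate validity tests are needed.
--     filas = mapa.strip().split('\n')
--     m = len(filas[0])
--     grid = [[int(c) for c in fila][:m] for fila in filas]  # width = width of the first row
--     n = len(grid)
--     pad = [0] * m
--     resultado = {}
--     for y, (arriba, fila, abajo) in enumerate(zip([pad] + grid, grid, grid[1:] + [pad])):
--         letra = chr(97 + n - 1 - y)
--         sup = chr(97 + n - y)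
--         inf = chr(95 + n - y)
--         for x, (izq, v, der, up, dn) in enumerate(zip([0] + fila, fila, fila[1:] + [0], arriba, abajo)):
--             if v:
--                 vecinos = {}
--                 if up:
--                     vecinos[sup + str(x + 1)] = up
--                 if izq:
--                     vecinos[letra + str(x)] = izq
--                 if der:
--                     vecinos[letra + str(x + 2)] = der
--                 if dn:
--                     vecinos[inf + str(x + 1)] = dn
--                 resultado[letra + str(x + 1)] = vecinos
--     return resultado
-- ===== Notes on version B (the rewrite author's own statement) =====
-- stated objective: alternative
-- what changed: Replaces the per-cell scan over 4 coordinate offsets with its es_valida bounds checks by an index-free sliding-window sweep: each row is zipped with the zero-padded rows above/below and with itself shifted left/right, so neighbours are read directly from the window and no coordinate validity test or double indexing remains.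
import Mathlib
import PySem

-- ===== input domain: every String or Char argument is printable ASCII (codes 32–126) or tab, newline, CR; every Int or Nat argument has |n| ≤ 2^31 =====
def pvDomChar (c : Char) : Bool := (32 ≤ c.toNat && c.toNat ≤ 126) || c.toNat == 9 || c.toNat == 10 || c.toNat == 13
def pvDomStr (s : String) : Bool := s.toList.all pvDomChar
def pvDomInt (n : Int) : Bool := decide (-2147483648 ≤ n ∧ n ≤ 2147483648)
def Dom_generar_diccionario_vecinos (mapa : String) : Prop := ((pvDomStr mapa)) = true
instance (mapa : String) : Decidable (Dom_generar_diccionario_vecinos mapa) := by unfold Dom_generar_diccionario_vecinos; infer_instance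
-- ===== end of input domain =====

-- B replaces the per-cell 4-offset scan with bounds checks by an index-free sliding-window
-- sweep over rows zipped with their padded neighbours (objective: alternative).


-- ===== PORT A =====
-- shared label formatter: f'{c}{k}' for a char c and int k
def pvEtiqueta (c : Char) (k : Int) : String := String.ofList (c :: PySem.Int.toChars k)

-- int(c) for a single character c; exact whenever c is a digit (guaranteed by Pre_)
def pvDigit (c : Char) : Int := (PySem.Int.ofChars? [c]).getD 0

def generar_diccionario_vecinos (mapa : String) : List (String × List (String × Int)) :=
  let filas := PySem.Chars.splitOn (PySem.Chars.strip mapa.toList) ['\n']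
  let matriz := filas.map (fun fila => fila.map pvDigit)
  -- list indexing below is via pyGetD; exact because Pre_ keeps every access in range
  let m : Int := (matriz.headD []).length
  let n : Int := matriz.length
  let posiciones : List (Int × Int) := [(0, -1), (-1, 0), (1, 0), (0, 1)]
  let esValida : Int → Int → Bool := fun x y =>
    decide (0 ≤ x) && decide (x < m) && decide (0 ≤ y) && decide (y < n) &&
      decide (PySem.List.pyGetD (PySem.List.pyGetD matriz y []) x 0 ≠ 0)
  let d := (PySem.List.pyRange 0 n).foldl (fun d y =>
    (PySem.List.pyRange 0 m).foldl (fun d x =>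
      let valor := PySem.List.pyGetD (PySem.List.pyGetD matriz y []) x 0
      if valor ≠ 0 then
        let vecinos := posiciones.foldl (fun v p =>
          let nx := x + p.1
          let ny := y + p.2
          if esValida nx ny then
            v.insert (pvEtiqueta (Char.ofNat (97 + n - 1 - ny).toNat) (nx + 1))
              (PySem.List.pyGetD (PySem.List.pyGetD matriz ny []) nx 0)
          else v) (PySem.Dict.empty : PySem.Dict String Int)
        d.insert (pvEtiqueta (Char.ofNat (97 + n - 1 - y).toNat) (x + 1)) vecinos
      else d) d) (PySem.Dict.empty : PySem.Dict String (PySem.Dict String Int))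
  d.items.map (fun p => (p.1, p.2.items))

-- ===== PORT B =====
def generar_diccionario_vecinos_alt (mapa : String) : List (String × List (String × Int)) :=
  let filas := PySem.Chars.splitOn (PySem.Chars.strip mapa.toList) ['\n']
  let m := (filas.headD []).length
  -- fila[:m] with 0 ≤ m is List.take m
  let grid := filas.map (fun fila => (fila.map pvDigit).take m)
  let n := grid.length
  let pad : List Int := List.replicate m 0
  let res := (PySem.List.enumerate ((pad :: grid).zip (grid.zip (grid.drop 1 ++ [pad])))).foldl
    (fun res t =>
      let y := t.1
      let arriba := t.2.1
      let fila := t.2.2.1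
      let abajo := t.2.2.2
      let letra := Char.ofNat (97 + (n : Int) - 1 - y).toNat
      let sup := Char.ofNat (97 + (n : Int) - y).toNat
      let inf := Char.ofNat (95 + (n : Int) - y).toNat
      (PySem.List.enumerate (((0 : Int) :: fila).zip (fila.zip ((fila.drop 1 ++ [(0 : Int)]).zip (arriba.zip abajo))))).foldl
        (fun res e =>
          let x := e.1
          let izq := e.2.1
          let v := e.2.2.1
          let der := e.2.2.2.1
          let up := e.2.2.2.2.1
          let dn := e.2.2.2.2.2
          if v ≠ 0 then
            let vecinos : PySem.Dict String Int := PySem.Dict.empty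
            let vecinos := if up ≠ 0 then vecinos.insert (pvEtiqueta sup (x + 1)) up else vecinos
            let vecinos := if izq ≠ 0 then vecinos.insert (pvEtiqueta letra x) izq else vecinos
            let vecinos := if der ≠ 0 then vecinos.insert (pvEtiqueta letra (x + 2)) der else vecinos
            let vecinos := if dn ≠ 0 then vecinos.insert (pvEtiqueta inf (x + 1)) dn else vecinos
            res.insert (pvEtiqueta letra (x + 1)) vecinos
          else res) res) (PySem.Dict.empty : PySem.Dict String (PySem.Dict String Int))
  res.items.map (fun p => (p.1, p.2.items))


-- ===== PRECONDITION & SPEC =====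
-- Pre_ excludes exactly the inputs on which A raises: a non-digit character (ValueError from
-- int(c)) and a line shorter than the first line (IndexError from matriz[y][x]).
def Pre_generar_diccionario_vecinos (mapa : String) : Prop :=
  let filas := PySem.Chars.splitOn (PySem.Chars.strip mapa.toList) ['\n']
  (filas.all (fun fila =>
      fila.all PySem.Chars.isdigit && decide ((filas.headD []).length ≤ fila.length))) = true
instance (mapa : String) : Decidable (Pre_generar_diccionario_vecinos mapa) := by unfold Pre_generar_diccionario_vecinos; infer_instance

def pvWitness_generar_diccionario_vecinos : String := "120\n005\n111"

def Spec_generar_diccionario_vecinos (mapa : String) (out : List (String × List (String × Int))) : Prop := out = generar_diccionario_vecinos_alt mapa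
instance (mapa : String) (out : List (String × List (String × Int))) : Decidable (Spec_generar_diccionario_vecinos mapa out) := by unfold Spec_generar_diccionario_vecinos; infer_instance

-- ===== CLAIM (what is proved, stated in full; the proofs are below) =====
def Claim_equal_generar_diccionario_vecinos : Prop := ∀ (mapa : String), Dom_generar_diccionario_vecinos mapa → Pre_generar_diccionario_vecinos mapa → Spec_generar_diccionario_vecinos mapa (generar_diccionario_vecinos mapa)

-- ===== LEMMAS AND PROOFS =====

-- ---- proof helpers ----
def pvVal (L : List (List Char)) (y x : Nat) : Int := ((L.getD y []).map pvDigit).getD x 0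

def pvKey (n y : Nat) (k : Int) : String := pvEtiqueta (Char.ofNat (96 + n - y)) k

def pvVec (L : List (List Char)) (n m y x : Nat) : PySem.Dict String Int :=
  let e : PySem.Dict String Int := PySem.Dict.empty
  let e := if 1 ≤ y ∧ pvVal L (y-1) x ≠ 0 then e.insert (pvKey n (y-1) ((x:Int)+1)) (pvVal L (y-1) x) else e
  let e := if 1 ≤ x ∧ pvVal L y (x-1) ≠ 0 then e.insert (pvKey n y (x:Int)) (pvVal L y (x-1)) else e
  let e := if x+1 < m ∧ pvVal L y (x+1) ≠ 0 then e.insert (pvKey n y ((x:Int)+2)) (pvVal L y (x+1)) else e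
  let e := if y+1 < n ∧ pvVal L (y+1) x ≠ 0 then e.insert (pvKey n (y+1) ((x:Int)+1)) (pvVal L (y+1) x) else e
  e

def pvCell (L : List (List Char)) (n m y x : Nat) (d : PySem.Dict String (PySem.Dict String Int)) :
    PySem.Dict String (PySem.Dict String Int) :=
  if pvVal L y x ≠ 0 then d.insert (pvKey n y ((x:Int)+1)) (pvVec L n m y x) else d

def pvFoldR (L : List (List Char)) : PySem.Dict String (PySem.Dict String Int) :=
  (List.range L.length).foldl (fun d y =>
    (List.range (L.headD []).length).foldl (fun d x => pvCell L L.length (L.headD []).length y x d) d)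
    PySem.Dict.empty

def pvFoldA (L : List (List Char)) : PySem.Dict String (PySem.Dict String Int) :=
  let matriz := L.map (fun fila => fila.map pvDigit)
  let m : Int := (matriz.headD []).length
  let n : Int := matriz.length
  let posiciones : List (Int × Int) := [(0, -1), (-1, 0), (1, 0), (0, 1)]
  let esValida : Int → Int → Bool := fun x y =>
    decide (0 ≤ x) && decide (x < m) && decide (0 ≤ y) && decide (y < n) &&
      decide (PySem.List.pyGetD (PySem.List.pyGetD matriz y []) x 0 ≠ 0)
  (PySem.List.pyRange 0 n).foldl (fun d y =>
    (PySem.List.pyRange 0 m).foldl (fun d x =>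
      let valor := PySem.List.pyGetD (PySem.List.pyGetD matriz y []) x 0
      if valor ≠ 0 then
        let vecinos := posiciones.foldl (fun v p =>
          let nx := x + p.1
          let ny := y + p.2
          if esValida nx ny then
            v.insert (pvEtiqueta (Char.ofNat (97 + n - 1 - ny).toNat) (nx + 1))
              (PySem.List.pyGetD (PySem.List.pyGetD matriz ny []) nx 0)
          else v) (PySem.Dict.empty : PySem.Dict String Int)
        d.insert (pvEtiqueta (Char.ofNat (97 + n - 1 - y).toNat) (x + 1)) vecinos
      else d) d) (PySem.Dict.empty : PySem.Dict String (PySem.Dict String Int))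

def pvFoldB (L : List (List Char)) : PySem.Dict String (PySem.Dict String Int) :=
  let m := (L.headD []).length
  let grid := L.map (fun fila => (fila.map pvDigit).take m)
  let n := grid.length
  let pad : List Int := List.replicate m 0
  (PySem.List.enumerate ((pad :: grid).zip (grid.zip (grid.drop 1 ++ [pad])))).foldl
    (fun res t =>
      let y := t.1
      let arriba := t.2.1
      let fila := t.2.2.1
      let abajo := t.2.2.2
      let letra := Char.ofNat (97 + (n : Int) - 1 - y).toNat
      let sup := Char.ofNat (97 + (n : Int) - y).toNat
      let inf := Char.ofNat (95 + (n : Int) - y).toNat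
      (PySem.List.enumerate (((0 : Int) :: fila).zip (fila.zip ((fila.drop 1 ++ [(0 : Int)]).zip (arriba.zip abajo))))).foldl
        (fun res e =>
          let x := e.1
          let izq := e.2.1
          let v := e.2.2.1
          let der := e.2.2.2.1
          let up := e.2.2.2.2.1
          let dn := e.2.2.2.2.2
          if v ≠ 0 then
            let vecinos : PySem.Dict String Int := PySem.Dict.empty
            let vecinos := if up ≠ 0 then vecinos.insert (pvEtiqueta sup (x + 1)) up else vecinos
            let vecinos := if izq ≠ 0 then vecinos.insert (pvEtiqueta letra x) izq else vecinos
            let vecinos := if der ≠ 0 then vecinos.insert (pvEtiqueta letra (x + 2)) der else vecinos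
            let vecinos := if dn ≠ 0 then vecinos.insert (pvEtiqueta inf (x + 1)) dn else vecinos
            res.insert (pvEtiqueta letra (x + 1)) vecinos
          else res) res) (PySem.Dict.empty : PySem.Dict String (PySem.Dict String Int))

theorem pvA_def (mapa : String) :
    generar_diccionario_vecinos mapa =
      (pvFoldA (PySem.Chars.splitOn (PySem.Chars.strip mapa.toList) ['\n'])).items.map
        (fun p => (p.1, p.2.items)) := rfl

theorem pvB_def (mapa : String) :
    generar_diccionario_vecinos_alt mapa =
      (pvFoldB (PySem.Chars.splitOn (PySem.Chars.strip mapa.toList) ['\n'])).items.map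
        (fun p => (p.1, p.2.items)) := rfl

theorem pv_headD_len (L : List (List Char)) :
    ((L.map (fun fila => fila.map pvDigit)).headD []).length = (L.headD []).length := by
  cases L <;> simp

theorem pv_val_cast (L : List (List Char)) (i j : Nat) :
    PySem.List.pyGetD (PySem.List.pyGetD (L.map (fun fila => fila.map pvDigit)) (i:Int) [])
      (j:Int) 0 = pvVal L i j := by
  rw [show ([] : List Int) = ([] : List Char).map pvDigit from rfl, PySem.List.pyGetD_map]
  rw [PySem.List.pyGetD_natCast, PySem.List.pyGetD_natCast]
  simp [pvVal]

theorem pv_up_ite (L : List (List Char)) (y x : Nat) (hy : y < L.length)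
    (_hx : x < (L.headD []).length) (v : PySem.Dict String Int) :
    (if (decide (0 ≤ (x:Int) + 0) && decide ((x:Int) + 0 < ((L.headD []).length:Int)) &&
          decide (0 ≤ (y:Int) + -1) && decide ((y:Int) + -1 < (L.length:Int)) &&
          decide (PySem.List.pyGetD (PySem.List.pyGetD (L.map (fun fila => fila.map pvDigit)) ((y:Int) + -1) []) ((x:Int) + 0) 0 ≠ 0)) = true
      then v.insert (pvEtiqueta (Char.ofNat (97 + (L.length:Int) - 1 - ((y:Int) + -1)).toNat) ((x:Int) + 0 + 1))
            (PySem.List.pyGetD (PySem.List.pyGetD (L.map (fun fila => fila.map pvDigit)) ((y:Int) + -1) []) ((x:Int) + 0) 0)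
      else v)
    = (if 1 ≤ y ∧ pvVal L (y-1) x ≠ 0
        then v.insert (pvKey L.length (y-1) ((x:Int)+1)) (pvVal L (y-1) x) else v) := by
  by_cases h1 : 1 ≤ y
  · rw [show ((y:Int) + -1) = ((y-1 : Nat) : Int) by omega]
    simp only [add_zero, pv_val_cast, Bool.and_eq_true, decide_eq_true_eq]
    rw [show (97 + (L.length:Int) - 1 - ((y-1:Nat):Int)).toNat = 96 + L.length - (y-1) by omega]
    exact if_congr (Iff.intro (fun h => ⟨h1, h.2⟩) (fun h => ⟨⟨⟨⟨by omega, by omega⟩, by omega⟩, by omega⟩, h.2⟩)) rfl rfl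
  · rw [if_neg, if_neg]
    · exact fun h => h1 h.1
    · simp only [Bool.and_eq_true, decide_eq_true_eq]
      rintro ⟨⟨⟨⟨-, -⟩, h3⟩, -⟩, -⟩
      omega

theorem pv_left_ite (L : List (List Char)) (y x : Nat) (hy : y < L.length)
    (hx : x < (L.headD []).length) (v : PySem.Dict String Int) :
    (if (decide (0 ≤ (x:Int) + -1) && decide ((x:Int) + -1 < ((L.headD []).length:Int)) &&
          decide (0 ≤ (y:Int) + 0) && decide ((y:Int) + 0 < (L.length:Int)) &&
          decide (PySem.List.pyGetD (PySem.List.pyGetD (L.map (fun fila => fila.map pvDigit)) ((y:Int) + 0) []) ((x:Int) + -1) 0 ≠ 0)) = true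
      then v.insert (pvEtiqueta (Char.ofNat (97 + (L.length:Int) - 1 - ((y:Int) + 0)).toNat) ((x:Int) + -1 + 1))
            (PySem.List.pyGetD (PySem.List.pyGetD (L.map (fun fila => fila.map pvDigit)) ((y:Int) + 0) []) ((x:Int) + -1) 0)
      else v)
    = (if 1 ≤ x ∧ pvVal L y (x-1) ≠ 0
        then v.insert (pvKey L.length y ((x:Int))) (pvVal L y (x-1)) else v) := by
  by_cases h1 : 1 ≤ x
  · rw [show ((x:Int) + -1) = ((x-1 : Nat) : Int) by omega]
    rw [show ((x-1:Nat):Int) + 1 = ((x:Nat):Int) by omega]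
    simp only [add_zero, pv_val_cast, Bool.and_eq_true, decide_eq_true_eq]
    rw [show (97 + (L.length:Int) - 1 - ((y:Nat):Int)).toNat = 96 + L.length - y by omega]
    exact if_congr (Iff.intro (fun h => ⟨h1, h.2⟩) (fun h => ⟨⟨⟨⟨by omega, by omega⟩, by omega⟩, by omega⟩, h.2⟩)) rfl rfl
  · rw [if_neg, if_neg]
    · exact fun h => h1 h.1
    · simp only [Bool.and_eq_true, decide_eq_true_eq]
      rintro ⟨⟨⟨⟨h2, -⟩, -⟩, -⟩, -⟩
      omega

theorem pv_right_ite (L : List (List Char)) (y x : Nat) (hy : y < L.length)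
    (_hx : x < (L.headD []).length) (v : PySem.Dict String Int) :
    (if (decide (0 ≤ (x:Int) + 1) && decide ((x:Int) + 1 < ((L.headD []).length:Int)) &&
          decide (0 ≤ (y:Int) + 0) && decide ((y:Int) + 0 < (L.length:Int)) &&
          decide (PySem.List.pyGetD (PySem.List.pyGetD (L.map (fun fila => fila.map pvDigit)) ((y:Int) + 0) []) ((x:Int) + 1) 0 ≠ 0)) = true
      then v.insert (pvEtiqueta (Char.ofNat (97 + (L.length:Int) - 1 - ((y:Int) + 0)).toNat) ((x:Int) + 1 + 1))
            (PySem.List.pyGetD (PySem.List.pyGetD (L.map (fun fila => fila.map pvDigit)) ((y:Int) + 0) []) ((x:Int) + 1) 0)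
      else v)
    = (if x+1 < (L.headD []).length ∧ pvVal L y (x+1) ≠ 0
        then v.insert (pvKey L.length y ((x:Int)+2)) (pvVal L y (x+1)) else v) := by
  rw [show ((x:Int) + 1) = ((x+1 : Nat) : Int) by omega]
  rw [show ((x+1:Nat):Int) + 1 = ((x:Nat):Int) + 2 by omega]
  simp only [add_zero, pv_val_cast, Bool.and_eq_true, decide_eq_true_eq]
  rw [show (97 + (L.length:Int) - 1 - ((y:Nat):Int)).toNat = 96 + L.length - y by omega]
  exact if_congr (Iff.intro (fun h => ⟨by omega, h.2⟩) (fun h => ⟨⟨⟨⟨by omega, by omega⟩, by omega⟩, by omega⟩, h.2⟩)) rfl rfl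

theorem pv_down_ite (L : List (List Char)) (y x : Nat) (hy : y < L.length)
    (hx : x < (L.headD []).length) (v : PySem.Dict String Int) :
    (if (decide (0 ≤ (x:Int) + 0) && decide ((x:Int) + 0 < ((L.headD []).length:Int)) &&
          decide (0 ≤ (y:Int) + 1) && decide ((y:Int) + 1 < (L.length:Int)) &&
          decide (PySem.List.pyGetD (PySem.List.pyGetD (L.map (fun fila => fila.map pvDigit)) ((y:Int) + 1) []) ((x:Int) + 0) 0 ≠ 0)) = true
      then v.insert (pvEtiqueta (Char.ofNat (97 + (L.length:Int) - 1 - ((y:Int) + 1)).toNat) ((x:Int) + 0 + 1))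
            (PySem.List.pyGetD (PySem.List.pyGetD (L.map (fun fila => fila.map pvDigit)) ((y:Int) + 1) []) ((x:Int) + 0) 0)
      else v)
    = (if y+1 < L.length ∧ pvVal L (y+1) x ≠ 0
        then v.insert (pvKey L.length (y+1) ((x:Int)+1)) (pvVal L (y+1) x) else v) := by
  rw [show ((y:Int) + 1) = ((y+1 : Nat) : Int) by omega]
  simp only [add_zero, pv_val_cast, Bool.and_eq_true, decide_eq_true_eq]
  rw [show (97 + (L.length:Int) - 1 - ((y+1:Nat):Int)).toNat = 96 + L.length - (y+1) by omega]
  exact if_congr (Iff.intro (fun h => ⟨by omega, h.2⟩) (fun h => ⟨⟨⟨⟨by omega, by omega⟩, by omega⟩, by omega⟩, h.2⟩)) rfl rfl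

theorem pvA_norm (L : List (List Char)) : pvFoldA L = pvFoldR L := by
  unfold pvFoldA pvFoldR
  dsimp only
  rw [pv_headD_len]
  rw [show ((L.map (fun fila => fila.map pvDigit)).length : Int) = (L.length : Int) by simp]
  rw [PySem.List.pyRange_zero_natCast, PySem.List.pyRange_zero_natCast, List.foldl_map]
  apply PySem.List.foldl_congr_mem
  intro d y hy
  rw [List.foldl_map]
  apply PySem.List.foldl_congr_mem
  intro d' x hx
  rw [List.mem_range] at hy hx
  unfold pvCell pvVec
  simp only [List.foldl_cons, List.foldl_nil]
  rw [pv_up_ite L y x hy hx, pv_left_ite L y x hy hx, pv_right_ite L y x hy hx,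
      pv_down_ite L y x hy hx]
  rw [pv_val_cast L y x]
  rw [show (97 + (L.length:Int) - 1 - ((y:Nat):Int)).toNat = 96 + L.length - y by omega]
  rfl

theorem pv_getD_zip3 {α β γ : Type} (A : List α) (B : List β) (C : List γ) (i : Nat)
    (hA : i < A.length) (hB : i < B.length) (hC : i < C.length) (da : α) (db : β) (dc : γ) :
    (A.zip (B.zip C)).getD i (da, (db, dc)) = (A.getD i da, (B.getD i db, C.getD i dc)) := by
  rw [List.getD_eq_getElem _ _ (by simp [List.length_zip]; omega)]
  simp only [List.getElem_zip]
  rw [← List.getD_eq_getElem A da hA, ← List.getD_eq_getElem B db hB, ← List.getD_eq_getElem C dc hC]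

theorem pv_getD_map {α β : Type} (f : α → β) (L : List α) (y : Nat) (hy : y < L.length)
    (d : β) (d' : α) : (L.map f).getD y d = f (L.getD y d') := by
  rw [List.getD_eq_getElem _ _ (by simpa using hy), List.getD_eq_getElem _ _ hy, List.getElem_map]

theorem pvB_norm (L : List (List Char))
    (hlen : ∀ f ∈ L, (L.headD []).length ≤ f.length) : pvFoldB L = pvFoldR L := by
  have hml : ∀ i, i < L.length → (L.headD []).length ≤ (L.getD i []).length := by
    intro i hi
    rw [List.getD_eq_getElem _ _ hi]
    exact hlen _ (List.getElem_mem hi)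
  unfold pvFoldB pvFoldR
  dsimp only
  rw [show (L.map (fun fila => (fila.map pvDigit).take (L.headD []).length)).length = L.length by simp]
  rw [PySem.List.enumerate_eq_map_pyRange _
    ((List.replicate (L.headD []).length (0:Int)),
      (([] : List Int), List.replicate (L.headD []).length (0:Int)))]
  have hlen_rows : PySem.List.len
      ((List.replicate (L.headD []).length (0:Int) ::
          L.map (fun fila => (fila.map pvDigit).take (L.headD []).length)).zip
        ((L.map (fun fila => (fila.map pvDigit).take (L.headD []).length)).zip
          ((L.map (fun fila => (fila.map pvDigit).take (L.headD []).length)).drop 1 ++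
            [List.replicate (L.headD []).length (0:Int)]))) = ((L.length : Nat) : Int) := by
    simp [PySem.List.len, List.length_zip]
    omega
  rw [hlen_rows, PySem.List.pyRange_zero_natCast, List.map_map, List.foldl_map]
  apply PySem.List.foldl_congr_mem
  intro d y hy
  rw [List.mem_range] at hy
  dsimp only [Function.comp]
  simp only [PySem.List.pyGetD_natCast]
  rw [pv_getD_zip3 _ _ _ y (by simp; omega) (by simp; omega) (by simp; omega)]
  rw [show ((97 + (L.length:Int) - 1 - (y:Nat)).toNat) = 96 + L.length - y by omega]
  -- row lists
  have hfila : (L.map (fun fila => (fila.map pvDigit).take (L.headD []).length)).getD y [] =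
      ((L.getD y []).map pvDigit).take (L.headD []).length :=
    pv_getD_map _ L y hy _ []
  have harriba : ((List.replicate (L.headD []).length (0:Int)) ::
        L.map (fun fila => (fila.map pvDigit).take (L.headD []).length)).getD y
        (List.replicate (L.headD []).length 0) =
      (if 1 ≤ y then ((L.getD (y-1) []).map pvDigit).take (L.headD []).length
        else List.replicate (L.headD []).length 0) := by
    cases y with
    | zero => simp
    | succ k =>
        rw [List.getD_cons_succ, if_pos (by omega)]
        exact pv_getD_map _ L k (by omega) _ []
  have habajo : ((L.map (fun fila => (fila.map pvDigit).take (L.headD []).length)).drop 1 ++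
        [List.replicate (L.headD []).length (0:Int)]).getD y (List.replicate (L.headD []).length 0) =
      (if y + 1 < L.length then ((L.getD (y+1) []).map pvDigit).take (L.headD []).length
        else List.replicate (L.headD []).length 0) := by
    by_cases h : y + 1 < L.length
    · rw [if_pos h, List.getD_eq_getElem _ _ (by simp; omega)]
      rw [List.getElem_append_left (by simp; omega), List.getElem_drop]
      rw [show (L.map (fun fila => (fila.map pvDigit).take (L.headD []).length))[1 + y]'(by simp; omega) =
        (L.map (fun fila => (fila.map pvDigit).take (L.headD []).length)).getD (1+y) [] from
          (List.getD_eq_getElem _ _ (by simp; omega)).symm]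
      rw [pv_getD_map _ L (1+y) (by omega) _ []]
      rw [show 1 + y = y + 1 by omega]
    · rw [if_neg h, List.getD_eq_getElem _ _ (by simp; omega)]
      rw [List.getElem_append_right (by simp; omega)]
      simp
  rw [hfila, harriba, habajo]
  -- abbreviations for the three window rows
  set m := (L.headD []).length with hm
  set fila := (List.map pvDigit (L.getD y [])).take m with hfi
  set arriba := (if 1 ≤ y then (List.map pvDigit (L.getD (y-1) [])).take m
      else List.replicate m (0:Int)) with har
  set abajo := (if y + 1 < L.length then (List.map pvDigit (L.getD (y+1) [])).take m
      else List.replicate m (0:Int)) with hab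
  have hlf : fila.length = m := by
    rw [hfi, List.length_take, List.length_map]
    have := hml y hy; omega
  have hla : arriba.length = m := by
    by_cases hy1 : 1 ≤ y
    · rw [har, if_pos hy1, List.length_take, List.length_map]
      have := hml (y-1) (by omega); omega
    · rw [har, if_neg hy1]; simp
  have hlb : abajo.length = m := by
    by_cases hy1 : y + 1 < L.length
    · rw [hab, if_pos hy1, List.length_take, List.length_map]
      have := hml (y+1) (by omega); omega
    · rw [hab, if_neg hy1]; simp
  rw [PySem.List.enumerate_eq_map_pyRange _ ((0:Int),((0:Int),((0:Int),((0:Int),(0:Int)))))]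
  have hlen_chain : PySem.List.len ((0 :: fila).zip (fila.zip ((List.drop 1 fila ++ [0]).zip (arriba.zip abajo)))) = ((m : Nat) : Int) := by
    simp [PySem.List.len, hlf, hla, hlb]; omega
  simp only [hlen_chain]
  rw [PySem.List.pyRange_zero_natCast, List.map_map, List.foldl_map]
  apply PySem.List.foldl_congr_mem
  intro d' j hj
  rw [List.mem_range] at hj
  dsimp only [Function.comp]
  have hjz : j < ((0::fila).zip (fila.zip ((fila.drop 1 ++ [0]).zip (arriba.zip abajo)))).length := by
    simp [List.length_zip, hlf, hla, hlb]; omega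
  have hcomp : (((0::fila).zip (fila.zip ((List.drop 1 fila ++ [0]).zip (arriba.zip abajo)))).getD j
      ((0:Int),((0:Int),((0:Int),((0:Int),(0:Int)))))) =
      ((0::fila).getD j 0, (fila.getD j 0, ((List.drop 1 fila ++ [0]).getD j 0,
        (arriba.getD j 0, abajo.getD j 0)))) := by
    rw [List.getD_eq_getElem _ _ hjz]
    simp only [List.getElem_zip]
    rw [← List.getD_eq_getElem (0::fila) (0:Int) (show j < (0::fila).length by simp [hlf]; omega),
        ← List.getD_eq_getElem fila (0:Int) (show j < fila.length by omega),
        ← List.getD_eq_getElem (List.drop 1 fila ++ [0]) (0:Int) (show j < (List.drop 1 fila ++ [0]).length by simp [hlf]; omega),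
        ← List.getD_eq_getElem arriba (0:Int) (show j < arriba.length by omega),
        ← List.getD_eq_getElem abajo (0:Int) (show j < abajo.length by omega)]
  simp only [PySem.List.pyGetD_natCast, hcomp]
  -- the five window scalars
  have hjm : j < m := by simpa using hj
  have hval_take : ∀ i x, i < L.length → x < m →
      ((List.map pvDigit (L.getD i [])).take m).getD x 0 = pvVal L i x := by
    intro i x hi hx
    have h2 := hml i hi
    rw [List.getD_eq_getElem _ _ (by rw [List.length_take, List.length_map]; omega),
        List.getElem_take, ← List.getD_eq_getElem _ _ (by rw [List.length_map]; omega)]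
    rfl
  have hv : fila.getD j 0 = pvVal L y j := by rw [hfi]; exact hval_take y j hy hjm
  have hup : arriba.getD j 0 = (if 1 ≤ y then pvVal L (y-1) j else 0) := by
    by_cases hy1 : 1 ≤ y
    · rw [har, if_pos hy1, if_pos hy1]; exact hval_take (y-1) j (by omega) hjm
    · rw [har, if_neg hy1, if_neg hy1]; exact List.getD_replicate _ (by omega)
  have hdn : abajo.getD j 0 = (if y + 1 < L.length then pvVal L (y+1) j else 0) := by
    by_cases hy1 : y + 1 < L.length
    · rw [hab, if_pos hy1, if_pos hy1]; exact hval_take (y+1) j (by omega) hjm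
    · rw [hab, if_neg hy1, if_neg hy1]; exact List.getD_replicate _ (by omega)
  have hizq : (0::fila).getD j 0 = (if 1 ≤ j then pvVal L y (j-1) else 0) := by
    cases j with
    | zero => simp
    | succ k =>
        rw [List.getD_cons_succ, if_pos (by omega), hfi]
        exact hval_take y k hy (by omega)
  have hder : (fila.drop 1 ++ [0]).getD j 0 = (if j + 1 < m then pvVal L y (j+1) else 0) := by
    by_cases hr : j + 1 < m
    · rw [if_pos hr, List.getD_eq_getElem _ _ (by simp [hlf]; omega),
          List.getElem_append_left (by simp [hlf]; omega), List.getElem_drop,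
          ← List.getD_eq_getElem fila (0:Int) (by omega)]
      rw [hfi, show 1 + j = j + 1 by omega]
      exact hval_take y (j+1) hy hr
    · rw [if_neg hr, List.getD_eq_getElem _ _ (by simp [hlf]; omega),
          List.getElem_append_right (by simp [hlf]; omega)]
      simp
  rw [hv, hup, hdn, hizq, hder]
  have hUp : ∀ v : PySem.Dict String Int,
      (if (if 1 ≤ y then pvVal L (y-1) j else 0) ≠ 0 then
          v.insert (pvEtiqueta (Char.ofNat (97 + (L.length:Int) - (y:Nat)).toNat) ((j:Int) + 1))
            (if 1 ≤ y then pvVal L (y-1) j else 0)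
        else v) =
      (if 1 ≤ y ∧ pvVal L (y-1) j ≠ 0 then
          v.insert (pvKey L.length (y-1) ((j:Int)+1)) (pvVal L (y-1) j) else v) := by
    intro v
    by_cases h1 : 1 ≤ y
    · rw [if_pos h1, show (97 + (L.length:Int) - (y:Nat)).toNat = 96 + L.length - (y-1) by omega]
      exact if_congr (Iff.intro (fun h => ⟨h1, h⟩) (fun h => h.2)) rfl rfl
    · rw [if_neg h1, if_neg (show ¬(0:Int) ≠ 0 by simp), if_neg (fun h => h1 h.1)]
  have hIzq : ∀ v : PySem.Dict String Int,
      (if (if 1 ≤ j then pvVal L y (j-1) else 0) ≠ 0 then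
          v.insert (pvEtiqueta (Char.ofNat (96 + L.length - y)) ((j:Int)))
            (if 1 ≤ j then pvVal L y (j-1) else 0)
        else v) =
      (if 1 ≤ j ∧ pvVal L y (j-1) ≠ 0 then
          v.insert (pvKey L.length y ((j:Int))) (pvVal L y (j-1)) else v) := by
    intro v
    by_cases h1 : 1 ≤ j
    · rw [if_pos h1]
      exact if_congr (Iff.intro (fun h => ⟨h1, h⟩) (fun h => h.2)) rfl rfl
    · rw [if_neg h1, if_neg (show ¬(0:Int) ≠ 0 by simp), if_neg (fun h => h1 h.1)]
  have hDer : ∀ v : PySem.Dict String Int,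
      (if (if j + 1 < m then pvVal L y (j+1) else 0) ≠ 0 then
          v.insert (pvEtiqueta (Char.ofNat (96 + L.length - y)) ((j:Int) + 2))
            (if j + 1 < m then pvVal L y (j+1) else 0)
        else v) =
      (if j + 1 < m ∧ pvVal L y (j+1) ≠ 0 then
          v.insert (pvKey L.length y ((j:Int)+2)) (pvVal L y (j+1)) else v) := by
    intro v
    by_cases h1 : j + 1 < m
    · rw [if_pos h1]
      exact if_congr (Iff.intro (fun h => ⟨h1, h⟩) (fun h => h.2)) rfl rfl
    · rw [if_neg h1, if_neg (show ¬(0:Int) ≠ 0 by simp), if_neg (fun h => h1 h.1)]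
  have hDn : ∀ v : PySem.Dict String Int,
      (if (if y + 1 < L.length then pvVal L (y+1) j else 0) ≠ 0 then
          v.insert (pvEtiqueta (Char.ofNat (95 + (L.length:Int) - (y:Nat)).toNat) ((j:Int) + 1))
            (if y + 1 < L.length then pvVal L (y+1) j else 0)
        else v) =
      (if y + 1 < L.length ∧ pvVal L (y+1) j ≠ 0 then
          v.insert (pvKey L.length (y+1) ((j:Int)+1)) (pvVal L (y+1) j) else v) := by
    intro v
    by_cases h1 : y + 1 < L.length
    · rw [if_pos h1, show (95 + (L.length:Int) - (y:Nat)).toNat = 96 + L.length - (y+1) by omega]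
      exact if_congr (Iff.intro (fun h => ⟨h1, h⟩) (fun h => h.2)) rfl rfl
    · rw [if_neg h1, if_neg (show ¬(0:Int) ≠ 0 by simp), if_neg (fun h => h1 h.1)]
  rw [hUp, hIzq, hDer, hDn]
  rfl

theorem generar_diccionario_vecinos_spec : Claim_equal_generar_diccionario_vecinos := by
  intro mapa _hdom hpre
  unfold Spec_generar_diccionario_vecinos
  rw [pvA_def, pvB_def]
  unfold Pre_generar_diccionario_vecinos at hpre
  simp only [Bool.and_eq_true, decide_eq_true_eq, List.all_eq_true] at hpre
  rw [pvA_norm, pvB_norm _ (fun f hf => (hpre f hf).2)]
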